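-- pv_equiv track=rewrite | github.com/bentherien/measevalcompetition | src/model/utils.py | get_qa_spans
-- ===== SOURCE A (Python) =====
-- def get_qa_spans(predictions):
--     spans=list()
--     state=0
--     i=-1
--     for pred in predictions:
--         i=i+1
--         if state==0:
--             if pred=='o' or pred=='MP' or pred=='ME' or pred=='QL':
--                 continue
--             else:
--                 state=1
--                 spans.append(i)
--                 continue
--         elif state==1:
--             if pred!='o' and pred!='MP' and pred!='ME' and pred!='QL':
--                 continue
--             else:
--                 state=0
--                 spans.append(i-1)
--                 continue
--
--     if len(spans)%2!=0:
--         spans.append(i)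
--     i=-1
--     all_spans=list()
--     cur_span=list()
--     for ofs in spans:
--         i=i+1
--         if i%2==0:
--             cur_span.append(ofs)
--         else:
--             cur_span.append(ofs)
--             all_spans.append(cur_span)
--             cur_span=list()
--
--     return all_spans
-- ===== SOURCE B (Python) =====
-- def get_qa_spans(predictions):
--     boundary = {'o', 'MP', 'ME', 'QL'}
--     out = []
--     start = None
--     for i, pred in enumerate(predictions):
--         if start is None:
--             if pred not in boundary:
--                 start = i
--         elif pred in boundary:
--             out.append([start, i - 1])
--             start = None
--     if start is not None:
--         out.append([start, len(predictions) - 1])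
--     return out
-- ===== Notes on version B (the rewrite author's own statement) =====
-- stated objective: simpler
-- what changed: A builds a flat list of boundary offsets, patches its parity after the loop, then runs a second loop to pair offsets into two-element lists; B does one pass that tracks the current run's start and emits each [start, end] pair directly, closing a still-open run with the last index after the loop.
import Mathlib
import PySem

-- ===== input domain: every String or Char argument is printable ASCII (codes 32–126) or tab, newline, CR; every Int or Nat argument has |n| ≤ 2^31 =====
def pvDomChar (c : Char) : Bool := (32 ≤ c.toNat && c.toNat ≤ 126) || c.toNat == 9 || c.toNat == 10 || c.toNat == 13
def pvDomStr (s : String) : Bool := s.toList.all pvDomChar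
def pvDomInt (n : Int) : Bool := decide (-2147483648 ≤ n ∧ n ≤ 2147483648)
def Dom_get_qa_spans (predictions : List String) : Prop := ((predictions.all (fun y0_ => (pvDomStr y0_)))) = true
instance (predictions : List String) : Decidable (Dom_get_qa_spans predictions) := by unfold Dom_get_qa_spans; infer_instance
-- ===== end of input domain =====

-- B replaces A's three-phase pipeline (flat offset list, parity fixup, pairing loop)
-- by a single pass that emits [start, end] pairs directly; objective: simpler.


-- ===== PORT A =====
def pvStepA (acc : List Int × Int × Int) (pred : String) : List Int × Int × Int :=
  let spans := acc.1
  let state := acc.2.1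
  let i := acc.2.2 + 1
  if state == 0 then
    if pred == "o" || pred == "MP" || pred == "ME" || pred == "QL" then (spans, state, i)
    else (spans ++ [i], 1, i)
  else if state == 1 then
    if pred != "o" && pred != "MP" && pred != "ME" && pred != "QL" then (spans, state, i)
    else (spans ++ [i - 1], 0, i)
  else (spans, state, i)

def pvPairA (acc : Int × List (List Int) × List Int) (ofs : Int) : Int × List (List Int) × List Int :=
  let i := acc.1 + 1
  let allSpans := acc.2.1
  let curSpan := acc.2.2
  if i % 2 == 0 then (i, allSpans, curSpan ++ [ofs])
  else (i, allSpans ++ [curSpan ++ [ofs]], [])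

def get_qa_spans (predictions : List String) : List (List Int) :=
  let r := predictions.foldl pvStepA ([], 0, -1)
  let spans := if r.1.length % 2 != 0 then r.1 ++ [r.2.2] else r.1
  (spans.foldl pvPairA (-1, [], [])).2.1

-- ===== PORT B =====
def pvIsBoundary (pred : String) : Bool :=
  pred == "o" || pred == "MP" || pred == "ME" || pred == "QL"

def pvStepB (acc : Int × List (List Int) × Option Int) (pred : String) :
    Int × List (List Int) × Option Int :=
  let i := acc.1
  let out := acc.2.1
  match acc.2.2 with
  | none => if pvIsBoundary pred then (i + 1, out, none) else (i + 1, out, some i)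
  | some s => if pvIsBoundary pred then (i + 1, out ++ [[s, i - 1]], none)
              else (i + 1, out, some s)

def get_qa_spans_alt (predictions : List String) : List (List Int) :=
  let r := predictions.foldl pvStepB (0, [], none)
  match r.2.2 with
  | none => r.2.1
  | some s => r.2.1 ++ [[s, (predictions.length : Int) - 1]]

-- ===== PRECONDITION & SPEC =====
def Spec_get_qa_spans (predictions : List String) (out : List (List Int)) : Prop := out = get_qa_spans_alt predictions
instance (predictions : List String) (out : List (List Int)) : Decidable (Spec_get_qa_spans predictions out) := by unfold Spec_get_qa_spans; infer_instance

-- ===== CLAIM (what is proved, stated in full; the proofs are below) =====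
def Claim_equal_get_qa_spans : Prop := ∀ (predictions : List String), Dom_get_qa_spans predictions → Spec_get_qa_spans predictions (get_qa_spans predictions)

-- ===== LEMMAS AND PROOFS =====

-- reference form of B: direct recursion over the remaining list
def pvScan : List String → Int → Option Int → List (List Int)
  | [], _, none => []
  | [], i, some s => [[s, i - 1]]
  | p :: rest, i, none =>
      if pvIsBoundary p then pvScan rest (i + 1) none else pvScan rest (i + 1) (some i)
  | p :: rest, i, some s =>
      if pvIsBoundary p then [s, i - 1] :: pvScan rest (i + 1) none
      else pvScan rest (i + 1) (some s)

-- pairing of an offset list, two at a time (a trailing singleton is dropped)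
def pvPairs : List Int → List (List Int)
  | [] => []
  | [_] => []
  | a :: b :: l => [a, b] :: pvPairs l

lemma stepA_single (spans : List Int) (st i : Int) (p : String) :
    pvStepA (spans, st, i) p =
      (spans ++ (pvStepA ([], st, i) p).1, (pvStepA ([], st, i) p).2) := by
  simp only [pvStepA]
  split_ifs <;> simp

lemma stepA_append (l : List String) (spans : List Int) (st i : Int) :
    l.foldl pvStepA (spans, st, i) =
      (spans ++ (l.foldl pvStepA ([], st, i)).1,
       (l.foldl pvStepA ([], st, i)).2) := by
  induction l generalizing spans st i with
  | nil => simp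
  | cons p rest ih =>
    rcases hE : pvStepA ([], st, i) p with ⟨c, st', i'⟩
    have h1 : pvStepA (spans, st, i) p = (spans ++ c, st', i') := by rw [stepA_single, hE]
    simp only [List.foldl_cons, h1, hE]
    rw [ih (spans ++ c), ih c]
    simp

lemma stepB_single (i : Int) (out : List (List Int)) (o : Option Int) (p : String) :
    pvStepB (i, out, o) p =
      ((pvStepB (i, [], o) p).1, out ++ (pvStepB (i, [], o) p).2.1,
       (pvStepB (i, [], o) p).2.2) := by
  cases o <;> by_cases hb : pvIsBoundary p <;> simp [pvStepB, hb]

lemma stepB_append (l : List String) (i : Int) (out : List (List Int)) (o : Option Int) :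
    l.foldl pvStepB (i, out, o) =
      ((l.foldl pvStepB (i, [], o)).1,
       out ++ (l.foldl pvStepB (i, [], o)).2.1,
       (l.foldl pvStepB (i, [], o)).2.2) := by
  induction l generalizing i out o with
  | nil => simp
  | cons p rest ih =>
    rcases hE : pvStepB (i, [], o) p with ⟨i', c, o'⟩
    have h1 : pvStepB (i, out, o) p = (i', out ++ c, o') := by rw [stepB_single, hE]
    simp only [List.foldl_cons, h1, hE]
    rw [ih i' (out ++ c), ih i' c]
    simp

lemma alt_eq_scan_aux (l : List String) (i : Int) (o : Option Int) :
    (match (l.foldl pvStepB (i, [], o)).2.2 with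
      | none => (l.foldl pvStepB (i, [], o)).2.1
      | some s => (l.foldl pvStepB (i, [], o)).2.1 ++ [[s, (l.foldl pvStepB (i, [], o)).1 - 1]])
      = pvScan l i o := by
  induction l generalizing i o with
  | nil => cases o <;> simp [pvScan]
  | cons p rest ih =>
    cases o with
    | none =>
      by_cases hb : pvIsBoundary p <;>
        simp only [List.foldl_cons, pvStepB, hb, if_true, if_false, pvScan, Bool.false_eq_true] <;>
        exact ih _ _
    | some s =>
      by_cases hb : pvIsBoundary p
      · simp only [List.foldl_cons, pvStepB, hb, if_true, pvScan]
        simp only [List.nil_append]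
        rw [stepB_append rest (i + 1) [[s, i - 1]] none]
        have h := ih (i + 1) none
        cases hE : (rest.foldl pvStepB (i + 1, [], none)).2.2 with
        | none => simp only [hE] at h ⊢; simp [h]
        | some t => simp only [hE] at h ⊢; simp at h ⊢; simp [h]
      · simp only [List.foldl_cons, pvStepB, hb, if_false, pvScan, Bool.false_eq_true]
        exact ih _ _

lemma alt_eq_scan (predictions : List String) :
    get_qa_spans_alt predictions = pvScan predictions 0 none := by
  have h := alt_eq_scan_aux predictions 0 none
  have hi : (predictions.foldl pvStepB (0, [], none)).1 = (predictions.length : Int) := by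
    have : ∀ (l : List String) (i : Int) (o : Option Int),
        (l.foldl pvStepB (i, [], o)).1 = i + l.length := by
      intro l
      induction l with
      | nil => simp
      | cons p rest ih =>
        intro i o
        rcases hE : pvStepB (i, [], o) p with ⟨i', c, o'⟩
        have hi' : i' = i + 1 := by
          cases o <;> by_cases hb : pvIsBoundary p <;> simp [pvStepB, hb] at hE <;> omega
        simp only [List.foldl_cons, hE]
        rw [stepB_append rest i' c o', ih i' o']
        simp [hi']
        omega
    simpa using this predictions 0 none
  unfold get_qa_spans_alt
  rw [← h, hi]

lemma pairFold_eq (sp : List Int) : ∀ (j : Int) (all : List (List Int)), j % 2 = 1 →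
    (sp.foldl pvPairA (j, all, [])).2.1 = all ++ pvPairs sp := by
  induction sp using pvPairs.induct with
  | case1 => intro j all _; simp [pvPairs]
  | case2 a =>
    intro j all hj
    have h0 : (j + 1) % 2 = 0 := by omega
    simp [pvPairA, h0, pvPairs]
  | case3 a b l ih =>
    intro j all hj
    have h0 : (j + 1) % 2 = 0 := by omega
    have h1 : (j + 1 + 1) % 2 = 1 := by omega
    have hd : ¬ (2 ∣ j + 1 + 1) := by omega
    simp only [List.foldl_cons, pvPairA, h0]
    norm_num [hd]
    rw [ih (j + 1 + 1) (all ++ [[a, b]]) h1]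
    simp [pvPairs]

-- the fixed-up flat offset list A builds from the remaining input, given the next token
-- index i and the pending open-run start (if any)
def pvFix (o : Option Int) (l : List String) (i : Int) : List Int :=
  let r := l.foldl pvStepA ([], (match o with | none => 0 | some _ => 1), i - 1)
  let full := match o with | none => r.1 | some s => s :: r.1
  if full.length % 2 ≠ 0 then full ++ [r.2.2] else full

lemma pair_cons_fix (s i : Int) (sp : List Int) (fin : Int) (tail : List (List Int))
    (h : pvPairs (if sp.length % 2 ≠ 0 then sp ++ [fin] else sp) = tail) :
    pvPairs (if (s :: ([i - 1] ++ sp)).length % 2 ≠ 0 then (s :: ([i - 1] ++ sp)) ++ [fin]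
             else (s :: ([i - 1] ++ sp))) = [s, i - 1] :: tail := by
  have hsh : s :: ([i - 1] ++ sp) = s :: (i - 1) :: sp := by simp
  rw [hsh]
  by_cases hpar : sp.length % 2 = 0
  · rw [if_neg (by simp [Nat.add_mod, hpar])]
    rw [if_neg (by simp [hpar])] at h
    rw [pvPairs]
    simp [h]
  · rw [if_pos (by simp [Nat.add_mod, Nat.mod_mod_of_dvd]; omega)]
    rw [if_pos (by omega)] at h
    rw [show s :: (i - 1) :: sp ++ [fin] = [s, i - 1] ++ (sp ++ [fin]) from by simp,
        show [s, i - 1] ++ (sp ++ [fin]) = s :: (i - 1) :: (sp ++ [fin]) from by simp, pvPairs]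
    simp [h]

lemma main_lemma (l : List String) : ∀ (i : Int) (o : Option Int),
    pvPairs (pvFix o l i) = pvScan l i o := by
  induction l with
  | nil =>
    intro i o
    cases o <;> simp [pvFix, pvScan, pvPairs]
  | cons p rest ih =>
    intro i o
    cases o with
    | none =>
      by_cases hb : pvIsBoundary p
      · have hbeq : (p == "o" || p == "MP" || p == "ME" || p == "QL") = true := hb
        have hstep : pvStepA ([], 0, i - 1) p = ([], 0, i) := by
          simp [pvStepA, hbeq]
        have h := ih (i + 1) none
        simp only [pvFix, show i + 1 - 1 = i from by omega] at h
        simp only [pvFix, List.foldl_cons, hstep, pvScan, hb, if_true]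
        exact h
      · have hbeq : (p == "o" || p == "MP" || p == "ME" || p == "QL") = false := by
          simpa [pvIsBoundary] using hb
        have hstep : pvStepA ([], 0, i - 1) p = ([i], 1, i) := by
          simp [pvStepA, hbeq]
        have h := ih (i + 1) (some i)
        simp only [pvFix, show i + 1 - 1 = i from by omega] at h
        simp only [pvFix, List.foldl_cons, hstep, pvScan, hb, Bool.false_eq_true, if_false]
        rw [stepA_append rest [i] 1 i]
        simpa using h
    | some s =>
      by_cases hb : pvIsBoundary p
      · have hbne : (p != "o" && p != "MP" && p != "ME" && p != "QL") = false := by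
          simp [pvIsBoundary] at hb
          rcases hb with ((h | h) | h) | h <;> simp [h]
        have hstep : pvStepA ([], 1, i - 1) p = ([i - 1], 0, i) := by
          simp [pvStepA, hbne]
        have h := ih (i + 1) none
        simp only [pvFix, show i + 1 - 1 = i from by omega] at h
        simp only [pvFix, List.foldl_cons, hstep, pvScan, hb, if_true]
        rw [stepA_append rest [i - 1] 0 i]
        exact pair_cons_fix s i _ _ _ h
      · have hbne : (p != "o" && p != "MP" && p != "ME" && p != "QL") = true := by
          simp [pvIsBoundary] at hb
          simp [hb]
        have hstep : pvStepA ([], 1, i - 1) p = ([], 1, i) := by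
          simp [pvStepA, hbne]
        have h := ih (i + 1) (some s)
        simp only [pvFix, show i + 1 - 1 = i from by omega] at h
        simp only [pvFix, List.foldl_cons, hstep, pvScan, hb, Bool.false_eq_true, if_false]
        exact h

lemma a_eq_pairs_fix (predictions : List String) :
    get_qa_spans predictions = pvPairs (pvFix none predictions 0) := by
  unfold get_qa_spans pvFix
  simp only [show (0:Int) - 1 = -1 from rfl]
  set r := predictions.foldl pvStepA ([], 0, -1) with hr
  have hj : (-1 : Int) % 2 = 1 := by decide
  by_cases hpar : r.1.length % 2 = 0
  · rw [if_neg (by simp [hpar]), if_neg (not_not_intro hpar)]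
    simpa using pairFold_eq r.1 (-1) [] hj
  · rw [if_pos (by simpa using hpar), if_pos hpar]
    simpa using pairFold_eq (r.1 ++ [r.2.2]) (-1) [] hj

-- ===== VERDICT (by name: the statement is the Claim_ definition above) =====
theorem get_qa_spans_spec : Claim_equal_get_qa_spans := by
  intro predictions _
  unfold Spec_get_qa_spans
  rw [a_eq_pairs_fix, main_lemma, alt_eq_scan]
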